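-- pv_equiv track=rewrite | github.com/ehtec/pie-chart-ocr | helperfunctions.py | cluster_abs_1d
-- ===== SOURCE A (Python) =====
-- def cluster_abs_1d(input_values, atol):
--
--     if not bool(input_values):
--         return []
--
--     sorted_input_values = list(sorted(input_values))
--
--     res_clusters = [[sorted_input_values[0]]]
--
--     for i in range(1, len(sorted_input_values)):
--
--         if sorted_input_values[i] - res_clusters[-1][-1] <= atol:
--             res_clusters[-1].append(sorted_input_values[i])
--
--         else:
--             res_clusters.append([sorted_input_values[i]])
--
--     return res_clusters
-- ===== SOURCE B (Python) =====
-- def cluster_abs_1d(input_values, atol):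
--     s = sorted(input_values)
--     if not s:
--         return []
--     # pass 1: run-lengths of the clusters, from adjacent gaps only
--     lengths = []
--     run = 1
--     for p, v in zip(s, s[1:]):
--         if v - p > atol:
--             lengths.append(run)
--             run = 1
--         else:
--             run += 1
--     lengths.append(run)
--     # pass 2: materialise the clusters by slicing
--     out = []
--     pos = 0
--     for L in lengths:
--         out.append(s[pos:pos + L])
--         pos += L
--     return out
-- ===== Notes on version B (the rewrite author's own statement) =====
-- stated objective: alternative
-- what changed: B replaces A's single loop that grows a nested cluster list with two decoupled flat passes over the sorted values: first compute the clusters' run-lengths from adjacent gaps, then materialise each cluster by slicing the sorted list.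
import Mathlib
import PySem

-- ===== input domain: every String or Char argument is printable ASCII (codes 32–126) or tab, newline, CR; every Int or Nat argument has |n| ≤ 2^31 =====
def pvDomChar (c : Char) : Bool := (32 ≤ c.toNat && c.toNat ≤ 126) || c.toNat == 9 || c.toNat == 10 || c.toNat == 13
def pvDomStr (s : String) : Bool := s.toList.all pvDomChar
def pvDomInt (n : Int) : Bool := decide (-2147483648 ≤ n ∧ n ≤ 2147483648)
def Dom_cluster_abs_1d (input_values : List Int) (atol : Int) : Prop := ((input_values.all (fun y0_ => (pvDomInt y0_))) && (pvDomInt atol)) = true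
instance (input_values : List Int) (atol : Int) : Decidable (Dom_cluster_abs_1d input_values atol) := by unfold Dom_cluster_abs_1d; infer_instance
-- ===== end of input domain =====

-- B makes two decoupled passes over the sorted list — adjacent-gap run-lengths first, then
-- slicing the clusters out — instead of A's single loop growing a nested cluster list;
-- objective: alternative decomposition, same asymptotic cost.

-- ===== PORT A =====
-- one loop step of A: compare sorted[i] with res_clusters[-1][-1], append or start a new cluster
def stepA (atol : Int) (acc : List (List Int)) (v : Int) : List (List Int) :=
  match acc.getLast? with
  | some c =>
    match c.getLast? with
    | some w => if v - w ≤ atol then acc.dropLast ++ [c ++ [v]] else acc ++ [[v]]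
    | none => acc ++ [[v]]   -- unreachable: clusters are never empty
  | none => acc ++ [[v]]     -- unreachable: res_clusters starts nonempty

def cluster_abs_1d (input_values : List Int) (atol : Int) : List (List Int) :=
  if input_values = [] then []
  else
    match PySem.List.sorted input_values (fun x => x) false with
    | [] => []                                       -- unreachable: sorted keeps the length
    | x :: rest => rest.foldl (stepA atol) [[x]]     -- the i = 1 .. n-1 loop over sorted[i]

-- ===== PORT B =====
-- pass-1 step of B: on a gap flush the current run-length, else extend it
def stepLen (atol : Int) (st : List Int × Int) (pv : Int × Int) : List Int × Int :=
  if pv.2 - pv.1 > atol then (st.1 ++ [st.2], 1) else (st.1, st.2 + 1)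

-- pass-2 step of B: out.append(s[pos:pos+L]); pos += L
def stepSlice (s : List Int) (st : List (List Int) × Int) (L : Int) : List (List Int) × Int :=
  (st.1 ++ [PySem.List.slice s (some st.2) (some (st.2 + L))], st.2 + L)

def cluster_abs_1d_alt (input_values : List Int) (atol : Int) : List (List Int) :=
  let s := PySem.List.sorted input_values (fun x => x) false
  if s = [] then []
  else
    -- for p, v in zip(s, s[1:]): …     (run starts at 1, flushed once more at the end)
    let lr := (s.zip (PySem.List.slice s (some 1) none)).foldl (stepLen atol) ([], 1)
    let lengths := lr.1 ++ [lr.2]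
    -- for L in lengths: out.append(s[pos:pos+L]); pos += L
    (lengths.foldl (stepSlice s) ([], 0)).1

-- ===== PRECONDITION & SPEC =====
def Spec_cluster_abs_1d (input_values : List Int) (atol : Int) (out : List (List Int)) : Prop := out = cluster_abs_1d_alt input_values atol
instance (input_values : List Int) (atol : Int) (out : List (List Int)) : Decidable (Spec_cluster_abs_1d input_values atol out) := by unfold Spec_cluster_abs_1d; infer_instance

-- ===== CLAIM (what is proved, stated in full; the proofs are below) =====
def Claim_equal_cluster_abs_1d : Prop := ∀ (input_values : List Int) (atol : Int), Dom_cluster_abs_1d input_values atol → Spec_cluster_abs_1d input_values atol (cluster_abs_1d input_values atol)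

-- ===== LEMMAS AND PROOFS =====

-- reference recursion: clusters of (x :: ys), splitting where the adjacent gap exceeds atol
def goCl (atol : Int) (x : Int) : List Int → List (List Int)
  | [] => [[x]]
  | y :: ys =>
    if y - x ≤ atol then
      match goCl atol y ys with
      | [] => [[x]]
      | c :: cs => (x :: c) :: cs
    else [x] :: goCl atol y ys

-- reference recursion: the cluster run-lengths of (x :: ys)
def lensCl (atol : Int) (x : Int) : List Int → List Int
  | [] => [1]
  | y :: ys =>
    if y - x ≤ atol then
      match lensCl atol y ys with
      | [] => [1]
      | L :: Ls => (L + 1) :: Ls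
    else 1 :: lensCl atol y ys

theorem goCl_shape (atol y : Int) (ys : List Int) :
    ∃ t cs, goCl atol y ys = (y :: t) :: cs := by
  cases ys with
  | nil => exact ⟨[], [], rfl⟩
  | cons z zs =>
    simp only [goCl]
    split_ifs
    · cases h : goCl atol z zs with
      | nil => exact ⟨[], [], rfl⟩
      | cons c cs => exact ⟨c, cs, rfl⟩
    · exact ⟨[], goCl atol z zs, rfl⟩

theorem goCl_flatten (atol x : Int) (ys : List Int) :
    (goCl atol x ys).flatten = x :: ys := by
  induction ys generalizing x with
  | nil => rfl
  | cons y ys ih =>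
    obtain ⟨t, cs, h⟩ := goCl_shape atol y ys
    have hy := ih y
    rw [h] at hy
    simp only [goCl, h]
    split_ifs
    · simpa using hy
    · simpa using hy

theorem lensCl_eq_map (atol x : Int) (ys : List Int) :
    lensCl atol x ys = (goCl atol x ys).map (fun c => (c.length : Int)) := by
  induction ys generalizing x with
  | nil => rfl
  | cons y ys ih =>
    obtain ⟨t, cs, h⟩ := goCl_shape atol y ys
    have hl := ih y
    rw [h] at hl
    simp only [goCl, lensCl, h, hl]
    split_ifs <;> simp [add_comm]

-- the pass-1 fold flushes run-lengths exactly as lensCl describes (run offsets the first one)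
theorem foldl_stepLen (atol : Int) (ys : List Int) :
    ∀ (p : Int) (acc : List Int) (run L : Int) (Ls : List Int),
      lensCl atol p ys = L :: Ls →
      List.foldl (stepLen atol) (acc, run) ((p :: ys).zip ys) =
        (acc ++ ((run - 1 + L) :: Ls).dropLast, ((run - 1 + L) :: Ls).getLastD 0) := by
  induction ys with
  | nil =>
    intro p acc run L Ls h
    simp only [lensCl] at h
    injection h with h1 h2
    subst h1; subst h2
    simp
  | cons y ys ih =>
    intro p acc run L Ls h
    have hsh : ∃ L' Ls', lensCl atol y ys = L' :: Ls' := by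
      cases hq : lensCl atol y ys with
      | nil =>
        exfalso
        rw [lensCl_eq_map] at hq
        obtain ⟨t, cs, hg⟩ := goCl_shape atol y ys
        rw [hg] at hq; simp at hq
      | cons a b => exact ⟨a, b, rfl⟩
    obtain ⟨L', Ls', hq⟩ := hsh
    simp only [lensCl, hq] at h
    simp only [List.zip_cons_cons, List.foldl_cons]
    by_cases hle : y - p ≤ atol
    · rw [if_pos hle] at h
      injection h with h1 h2
      have hstep : stepLen atol (acc, run) (p, y) = (acc, run + 1) := by
        simp [stepLen]; omega
      rw [hstep, ih y acc (run + 1) L' Ls' hq, ← h1, ← h2]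
      have he : (run + 1 - 1 + L' : Int) = run - 1 + (L' + 1) := by omega
      rw [he]
    · rw [if_neg hle] at h
      injection h with h1 h2
      have hstep : stepLen atol (acc, run) (p, y) = (acc ++ [run], 1) := by
        simp [stepLen]; omega
      rw [hstep, ih y (acc ++ [run]) 1 L' Ls' hq, ← h1, ← h2]
      cases Ls' with
      | nil => simp
      | cons m ms => simp

theorem dropLast_concat_getLastD (L : Int) (Ls : List Int) :
    (L :: Ls).dropLast ++ [(L :: Ls).getLastD 0] = L :: Ls := by
  induction Ls generalizing L with
  | nil => rfl
  | cons M Ms ih => simpa using congrArg (L :: ·) (ih M)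

-- the pass-2 fold slices each cluster back out of s, given where the remaining flat tail starts
theorem foldl_stepSlice (s : List Int) :
    ∀ (cs : List (List Int)) (m : Nat) (acc : List (List Int)),
      s.drop m = cs.flatten →
      List.foldl (stepSlice s) (acc, (m : Int)) (cs.map (fun c => (c.length : Int))) =
        (acc ++ cs, ((m + cs.flatten.length : Nat) : Int)) := by
  intro cs
  induction cs with
  | nil => intro m acc _; simp
  | cons c cs ih =>
    intro m acc hdrop
    simp only [List.map_cons, List.foldl_cons]
    have hstep : stepSlice s (acc, (m : Int)) (c.length : Int) =
        (acc ++ [c], ((m + c.length : Nat) : Int)) := by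
      simp only [stepSlice]
      have h1 : PySem.List.slice s (some ((m : Nat) : Int)) (some (((m : Nat) : Int) + ((c.length : Nat) : Int))) = c := by
        rw [PySem.List.slice_natCast_add, hdrop]
        simp [List.flatten_cons]
      rw [h1]
      simp only [Prod.mk.injEq]
      exact ⟨trivial, by push_cast; ring⟩
    rw [hstep]
    have hdrop' : s.drop (m + c.length) = cs.flatten := by
      rw [← List.drop_drop, hdrop]   -- drop (c.length) then the rest
      simp [List.flatten_cons]
    have := ih (m + c.length) (acc ++ [c]) hdrop'
    rw [this]
    simp only [Prod.mk.injEq]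
    exact ⟨by simp, by simp only [List.flatten_cons, List.length_append]; omega⟩

-- the A-side loop, with its accumulator exposed, computes goCl
theorem foldl_stepA_eq_goCl (atol : Int) (ys : List Int) :
    ∀ (acc : List (List Int)) (c : List Int) (x : Int) (t : List Int) (cs : List (List Int)),
      goCl atol x ys = (x :: t) :: cs →
      List.foldl (stepA atol) (acc ++ [c ++ [x]]) ys = acc ++ (c ++ x :: t) :: cs := by
  induction ys with
  | nil =>
    intro acc c x t cs h
    simp only [goCl] at h
    injection h with h1 h2
    injection h1 with _ h3
    simp [← h3, ← h2]
  | cons y ys ih =>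
    intro acc c x t cs h
    obtain ⟨t', cs', hsh⟩ := goCl_shape atol y ys
    simp only [goCl, hsh] at h
    simp only [List.foldl_cons]
    have hstep : stepA atol (acc ++ [c ++ [x]]) y =
        if y - x ≤ atol then acc ++ [(c ++ [x]) ++ [y]] else (acc ++ [c ++ [x]]) ++ [[y]] := by
      simp [stepA]
    by_cases hle : y - x ≤ atol
    · rw [hstep, if_pos hle]
      rw [if_pos hle] at h
      injection h with h1 h2
      injection h1 with _ h3
      have := ih acc (c ++ [x]) y t' cs' hsh
      rw [this, ← h3, ← h2]
      simp
    · rw [hstep, if_neg hle]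
      rw [if_neg hle] at h
      injection h with h1 h2
      injection h1 with _ h3
      have := ih (acc ++ [c ++ [x]]) [] y t' cs' hsh
      simp only [List.nil_append] at this
      rw [this, ← h3, ← h2]
      simp

-- B computes goCl of the sorted list
theorem alt_eq_goCl (atol x : Int) (input_values rest : List Int)
    (hs : PySem.List.sorted input_values (fun x => x) false = x :: rest) :
    cluster_abs_1d_alt input_values atol = goCl atol x rest := by
  unfold cluster_abs_1d_alt
  rw [hs]
  rw [if_neg (by simp)]
  rw [PySem.List.slice_from_one]
  have hlen : ∃ L Ls, lensCl atol x rest = L :: Ls := by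
    cases hq : lensCl atol x rest with
    | nil =>
      exfalso
      rw [lensCl_eq_map] at hq
      obtain ⟨t, cs, hg⟩ := goCl_shape atol x rest
      rw [hg] at hq; simp at hq
    | cons a b => exact ⟨a, b, rfl⟩
  obtain ⟨L, Ls, hq⟩ := hlen
  have h1 := foldl_stepLen atol rest x [] 1 L Ls hq
  simp only [List.tail_cons, h1, List.nil_append]
  have hbump : (1 - 1 + L : Int) = L := by omega
  rw [hbump, dropLast_concat_getLastD, ← hq, lensCl_eq_map]
  have h2 := foldl_stepSlice (x :: rest) (goCl atol x rest) 0 []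
    (by simpa using (goCl_flatten atol x rest).symm)
  simp only [Nat.cast_zero, List.nil_append] at h2
  rw [h2]

-- ===== VERDICT (by name: the statement is the Claim_ definition above) =====
theorem cluster_abs_1d_spec : Claim_equal_cluster_abs_1d := by
  intro input_values atol _
  unfold Spec_cluster_abs_1d
  by_cases hin : input_values = []
  · subst hin; rfl
  · cases hs : PySem.List.sorted input_values (fun x => x) false with
    | nil =>
      have hlen : (PySem.List.sorted input_values (fun x => x) false).length = input_values.length :=
        PySem.List.length_sorted (xs := input_values) (key := fun x : Int => x) (rev := false)
      rw [hs] at hlen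
      exact absurd (List.eq_nil_of_length_eq_zero hlen.symm) hin
    | cons x rest =>
      obtain ⟨t, cs, h⟩ := goCl_shape atol x rest
      have hA := foldl_stepA_eq_goCl atol rest [] [] x t cs h
      simp only [List.nil_append] at hA
      unfold cluster_abs_1d
      rw [if_neg hin, hs]
      simp only []
      rw [hA, alt_eq_goCl atol x input_values rest hs, h]
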